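-- pv_equiv track=rewrite | github.com/hongs1234/ICS4U-Classwork | Algorithms/Recursion_Practice/Recursion_Exercise.py | count8
-- ===== SOURCE A (Python) =====
-- def count8(n: int):
--     if n == 0:
--         return 0
--     right_most = n % 10
--     last_two = n % 100
--     if last_two == 88:
--         return 2 + count8(n//10)
--     elif right_most == 8:
--         return 1 + count8(n//10)
--     return count8(n//10)
-- ===== SOURCE B (Python) =====
-- def count8(n: int):
--     # Peel all digits into a list first, then count 8s in one scan and
--     # overlapping "88" adjacencies in a second scan (each pair adds one extra).
--     ds = []
--     while n != 0:
--         ds.append(n % 10)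
--         n //= 10
--     return ds.count(8) + sum(1 for a, b in zip(ds, ds[1:]) if a == 8 and b == 8)
-- ===== Notes on version B (the rewrite author's own statement) =====
-- stated objective: alternative
-- what changed: Replaces the non-tail recursion that re-inspects the last two digits at every level by an explicit digit list built once in a loop, with the result computed as (count of 8-digits) + (count of adjacent 8,8 pairs) in two flat scans.
import Mathlib
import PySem

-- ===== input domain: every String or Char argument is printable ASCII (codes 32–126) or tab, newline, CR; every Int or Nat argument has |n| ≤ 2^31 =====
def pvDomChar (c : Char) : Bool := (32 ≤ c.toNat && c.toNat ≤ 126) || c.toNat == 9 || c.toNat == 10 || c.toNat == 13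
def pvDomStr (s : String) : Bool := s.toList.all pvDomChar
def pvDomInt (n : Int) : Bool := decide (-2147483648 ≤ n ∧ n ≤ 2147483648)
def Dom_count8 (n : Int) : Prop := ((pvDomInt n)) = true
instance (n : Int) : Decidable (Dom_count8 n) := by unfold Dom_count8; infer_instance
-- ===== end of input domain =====

-- B replaces A's non-tail recursion by an explicit digit list built once, then two flat
-- scans: count of 8-digits plus count of adjacent (8,8) pairs (objective: alternative).

-- ===== PORT A =====
-- fuel makes the recursion total in Lean; n.toNat + 1 steps suffice for every n ≥ 0
def count8Fuel : Nat → Int → Int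
  | 0, _ => 0
  | fuel + 1, n =>
    if n = 0 then 0
    else
      let right_most := PySem.Int.mod n 10
      let last_two := PySem.Int.mod n 100
      if last_two = 88 then 2 + count8Fuel fuel (PySem.Int.floordiv n 10)
      else if right_most = 8 then 1 + count8Fuel fuel (PySem.Int.floordiv n 10)
      else count8Fuel fuel (PySem.Int.floordiv n 10)

def count8 (n : Int) : Int := count8Fuel (n.toNat + 1) n

-- ===== PORT B =====
-- the while loop of Source B: peel digits of n, least significant first (fuel as above)
def digitsFuel : Nat → Int → List Int
  | 0, _ => []
  | fuel + 1, n =>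
    if n = 0 then []
    else PySem.Int.mod n 10 :: digitsFuel fuel (PySem.Int.floordiv n 10)

def count8_alt (n : Int) : Int :=
  let ds := digitsFuel (n.toNat + 1) n
  (PySem.List.count ds 8 : Int) +
    (ds.zip (ds.drop 1)).foldl (fun acc p => if p.1 = 8 ∧ p.2 = 8 then acc + 1 else acc) 0

-- ===== PRECONDITION & SPEC =====
-- A recurses forever (RecursionError) on negative n and Source B's loop does not terminate
-- there either, so the claim is about the natural domain n ≥ 0.
def Pre_count8 (n : Int) : Prop := 0 ≤ n
instance (n : Int) : Decidable (Pre_count8 n) := by unfold Pre_count8; infer_instance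
def pvWitness_count8 : Int := (888)

def Spec_count8 (n : Int) (out : Int) : Prop := out = count8_alt n
instance (n : Int) (out : Int) : Decidable (Spec_count8 n out) := by unfold Spec_count8; infer_instance

-- ===== CLAIM (what is proved, stated in full; the proofs are below) =====
def Claim_equal_count8 : Prop := ∀ (n : Int), Dom_count8 n → Pre_count8 n → Spec_count8 n (count8 n)

-- ===== LEMMAS AND PROOFS =====

-- B's value as a function of a digit list
def altOf (ds : List Int) : Int :=
  (PySem.List.count ds 8 : Int) +
    (ds.zip (ds.drop 1)).foldl (fun acc p => if p.1 = 8 ∧ p.2 = 8 then acc + 1 else acc) 0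

theorem altOf_nil : altOf [] = 0 := by decide

theorem altOf_cons (d : Int) (rest : List Int) :
    altOf (d :: rest) =
      ((if d = 8 then 1 else 0) + (if d = 8 ∧ rest.head? = some 8 then 1 else 0)) + altOf rest := by
  unfold altOf
  cases rest with
  | nil =>
    simp only [PySem.List.count_eq, List.count_cons]
    split_ifs <;> simp_all
  | cons e r =>
    simp only [List.zip, List.drop, List.head?, List.zipWith,
      PySem.List.count_eq, List.count_cons, PySem.List.foldl_ite_add_one]
    by_cases hd : d = 8 <;> by_cases he : e = (8 : Int) <;>
      simp [hd, he] <;> omega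

theorem main_lemma : ∀ (fuel : Nat) (n : Int), 0 ≤ n → n.toNat < fuel →
    count8Fuel fuel n = altOf (digitsFuel fuel n) := by
  intro fuel
  induction fuel with
  | zero => intro n _ h; omega
  | succ f ih =>
    intro n hn hfuel
    by_cases h0 : n = 0
    · simp [count8Fuel, digitsFuel, h0, altOf_nil]
    · have h1 : (1 : Int) ≤ n := by omega
      have hdiv : PySem.Int.floordiv n 10 = n / 10 :=
        PySem.Int.floordiv_eq_ediv_of_pos (by norm_num)
      have hm10 : PySem.Int.mod n 10 = n % 10 :=
        PySem.Int.mod_eq_emod_of_pos (by norm_num)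
      have hm100 : PySem.Int.mod n 100 = n % 100 :=
        PySem.Int.mod_eq_emod_of_pos (by norm_num)
      have hq : 0 ≤ n / 10 := by omega
      have hlt : (n / 10).toNat < f := by omega
      have ihq := ih (n / 10) hq hlt
      -- head of the remaining digit list is (n/10) % 10 (or the list is empty when n/10 = 0)
      have hrec : count8Fuel (f + 1) n =
          (if n % 100 = 88 then 2 else if n % 10 = 8 then 1 else 0) + count8Fuel f (n / 10) := by
        simp only [count8Fuel, h0, hdiv, hm10, hm100]
        split_ifs <;> simp_all
      have hdig : digitsFuel (f + 1) n = n % 10 :: digitsFuel f (n / 10) := by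
        simp [digitsFuel, h0]
      rw [hrec, hdig, altOf_cons, ← ihq]
      congr 1
      -- it remains to match the branch weights with the digit/pair contributions
      by_cases hq0 : n / 10 = 0
      · have hsmall : n < 10 := by omega
        have : digitsFuel f (n / 10) = [] := by
          cases f with
          | zero => rfl
          | succ f' => simp [digitsFuel, hq0]
        rw [this]
        simp only [List.head?]
        have h88 : ¬ (n % 100 = 88) := by omega
        simp only [if_neg h88]
        split_ifs with h <;> simp_all
      · have hf1 : 1 ≤ f := by omega
        have hhead : (digitsFuel f (n / 10)).head? = some ((n / 10) % 10) := by
          cases f with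
          | zero => omega
          | succ f' =>
            simp [digitsFuel, hq0]
        rw [hhead]
        have hiff : n % 100 = 88 ↔ (n % 10 = 8 ∧ (n / 10) % 10 = 8) := by omega
        by_cases ha : n % 10 = 8 <;> by_cases hb : (n / 10) % 10 = 8 <;>
          simp [ha, hb, hiff]

-- ===== VERDICT (by name: the statement is the Claim_ definition above) =====
theorem count8_spec : Claim_equal_count8 := by
  intro n _ hpre
  show count8 n = count8_alt n
  unfold count8 count8_alt
  exact main_lemma (n.toNat + 1) n hpre (by omega)
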